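-- pv_equiv track=rewrite | github.com/rptrevin/AA228-Project | models/policyiterator.py | create_dirichlet_dict
-- ===== SOURCE A (Python) =====
-- def sum_row(row_dict):
--     res = 0
--     for key, val  in row_dict.items():
--         res += val
--     return res
--
-- def create_dirichlet_dict(total_num_state, N, A):
--     D = {}
--     for i in range(1,total_num_state+1):
--         for a in A:
--             if i in D.keys():
--                 D[i][a] = 1
--             else:
--                 D[i]={a: 1}
--
--             if i in N.keys():
--                 if a in N[i].keys():
--                     D[i][a] += sum_row(N[i][a])
--     return D
-- ===== SOURCE B (Python) =====
-- def create_dirichlet_dict(total_num_state, N, A):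
--     if not A:
--         return {}
--     D = {i: {a: 1 for a in A} for i in range(1, total_num_state + 1)}
--     for i, row in N.items():
--         if i in D:
--             for a, cell in row.items():
--                 if a in D[i]:
--                     D[i][a] += sum(cell.values())
--     return D
-- ===== Notes on version B (the rewrite author's own statement) =====
-- stated objective: faster
-- what changed: B builds the full default grid of 1s once with dict comprehensions and then adds the observation counts in a single second pass that iterates N's populated entries directly, instead of A's per-cell membership probing of D and N inside the i-by-A loop.
import Mathlib
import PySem

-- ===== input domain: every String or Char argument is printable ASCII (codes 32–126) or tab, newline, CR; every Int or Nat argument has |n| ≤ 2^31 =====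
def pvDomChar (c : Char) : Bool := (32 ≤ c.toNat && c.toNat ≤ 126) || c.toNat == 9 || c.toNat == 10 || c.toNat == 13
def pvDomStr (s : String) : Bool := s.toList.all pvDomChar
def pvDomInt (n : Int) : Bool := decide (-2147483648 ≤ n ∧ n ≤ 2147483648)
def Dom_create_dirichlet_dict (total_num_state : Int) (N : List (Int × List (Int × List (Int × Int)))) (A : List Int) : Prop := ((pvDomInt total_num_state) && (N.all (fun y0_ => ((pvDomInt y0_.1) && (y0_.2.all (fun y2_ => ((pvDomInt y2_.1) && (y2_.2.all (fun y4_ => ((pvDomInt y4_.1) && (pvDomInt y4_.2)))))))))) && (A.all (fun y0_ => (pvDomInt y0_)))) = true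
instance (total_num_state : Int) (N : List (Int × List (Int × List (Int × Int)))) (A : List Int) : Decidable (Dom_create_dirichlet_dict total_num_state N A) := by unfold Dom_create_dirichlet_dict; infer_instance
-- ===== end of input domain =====

-- B builds the full default grid of 1s up front and adds the observed counts in one direct pass
-- over N's populated entries, instead of A's per-cell membership probing of D and N.

-- ===== PORT A =====
-- Python dict lookup on an association list (first match): ports 'i in N.keys()' / 'N[i]'.
def pvGetA {α : Type} (d : List (Int × α)) (k : Int) : Option α := (d.find? (fun p => p.1 == k)).map (·.2)

-- port of helper sum_row
def pv_sum_row (row_dict : List (Int × Int)) : Int := row_dict.foldl (fun res kv => res + kv.2) 0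
def create_dirichlet_dict (total_num_state : Int) (N : List (Int × List (Int × List (Int × Int)))) (A : List Int) : List (Int × List (Int × Int)) :=
  let D : PySem.Dict Int (PySem.Dict Int Int) :=
    (PySem.List.pyRange 1 (total_num_state + 1) 1).foldl (fun D i =>
      A.foldl (fun D a =>
        let D := if (D.get? i).isSome then D.modify i PySem.Dict.empty (fun row => row.insert a 1)
                 else D.insert i (PySem.Dict.empty.insert a 1)
        match pvGetA N i with
        | some nrow =>
          match pvGetA nrow a with
          | some cell => D.modify i PySem.Dict.empty (fun row => row.modify a 0 (fun v => v + pv_sum_row cell))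
          | none => D
        | none => D) D) PySem.Dict.empty
  D.items.map (fun p => (p.1, p.2.items))

-- ===== PORT B =====
def create_dirichlet_dict_alt (total_num_state : Int) (N : List (Int × List (Int × List (Int × Int)))) (A : List Int) : List (Int × List (Int × Int)) :=
  if A.isEmpty then []
  else
    let D0 : PySem.Dict Int (PySem.Dict Int Int) :=
      (PySem.List.pyRange 1 (total_num_state + 1) 1).foldl (fun D i =>
        D.insert i (A.foldl (fun r a => r.insert a (1 : Int)) PySem.Dict.empty)) PySem.Dict.empty
    let D := N.foldl (fun D p =>
        if (D.get? p.1).isSome then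
          p.2.foldl (fun D q =>
            if ((D.getD p.1 PySem.Dict.empty).get? q.1).isSome then
              D.modify p.1 PySem.Dict.empty (fun r => r.modify q.1 0 (fun v => v + (q.2.foldl (fun s kv => s + kv.2) 0)))
            else D) D
        else D) D0
    D.items.map (fun p => (p.1, p.2.items))


-- ===== PRECONDITION & SPEC =====
-- Pre_ excludes association lists whose outer or row level in N carries a duplicate key: such a
-- list does not correspond to any Python dict (Python collapses duplicate keys last-wins when the
-- dict is formed, while the association-list convention looks up the first match), so the value
-- there is an artefact of the encoding, not of A.
def Pre_create_dirichlet_dict (total_num_state : Int) (N : List (Int × List (Int × List (Int × Int)))) (A : List Int) : Prop :=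
  (N.map (·.1)).Nodup ∧ ∀ p ∈ N, (p.2.map (·.1)).Nodup
instance (total_num_state : Int) (N : List (Int × List (Int × List (Int × Int)))) (A : List Int) : Decidable (Pre_create_dirichlet_dict total_num_state N A) := by unfold Pre_create_dirichlet_dict; infer_instance
def pvWitness_create_dirichlet_dict : Int × (List (Int × List (Int × List (Int × Int)))) × List Int :=
  (2, [(1, [(1, [(1, 3)])])], [1, 2])

def Spec_create_dirichlet_dict (total_num_state : Int) (N : List (Int × List (Int × List (Int × Int)))) (A : List Int) (out : List (Int × List (Int × Int))) : Prop := out = create_dirichlet_dict_alt total_num_state N A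
instance (total_num_state : Int) (N : List (Int × List (Int × List (Int × Int)))) (A : List Int) (out : List (Int × List (Int × Int))) : Decidable (Spec_create_dirichlet_dict total_num_state N A out) := by unfold Spec_create_dirichlet_dict; infer_instance

-- ===== CLAIM (what is proved, stated in full; the proofs are below) =====
def Claim_equal_create_dirichlet_dict : Prop := ∀ (total_num_state : Int) (N : List (Int × List (Int × List (Int × Int)))) (A : List Int), Dom_create_dirichlet_dict total_num_state N A → Pre_create_dirichlet_dict total_num_state N A → Spec_create_dirichlet_dict total_num_state N A (create_dirichlet_dict total_num_state N A)

-- ===== LEMMAS AND PROOFS =====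
theorem pvGetA_cons {α : Type} (p : Int × α) (l : List (Int × α)) (k : Int) :
    pvGetA (p :: l) k = if p.1 = k then some p.2 else pvGetA l k := by
  by_cases h : p.1 = k
  · simp [pvGetA, List.find?_cons_of_pos, h]
  · simp [pvGetA, List.find?_cons_of_neg, h]

theorem pvGetA_eq_none {α : Type} (l : List (Int × α)) (k : Int) (h : k ∉ l.map (·.1)) :
    pvGetA l k = none := by
  simp only [pvGetA, Option.map_eq_none_iff]
  rw [List.find?_eq_none]
  intro p hp
  simp only [beq_iff_eq]
  rintro rfl
  exact h (List.mem_map.mpr ⟨p, hp, rfl⟩)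

theorem pvGetA_mem {α : Type} {l : List (Int × α)} {k : Int} {v : α} (h : pvGetA l k = some v) :
    (k, v) ∈ l := by
  simp only [pvGetA, Option.map_eq_some_iff] at h
  obtain ⟨p, hp, rfl⟩ := h
  have h1 := List.find?_some hp
  have h2 := List.mem_of_find?_eq_some hp
  simp only [beq_iff_eq] at h1
  have : (k, p.2) = p := by rw [← h1]
  rwa [this]

-- insert of the present value is the identity
theorem insert_get?_self {ν : Type} (d : PySem.Dict Int ν) (k : Int) (v : ν)
    (h : d.get? k = some v) (hnd : d.keys.Nodup) : d.insert k v = d := by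
  apply PySem.Dict.ext
  rw [PySem.Dict.items_insert_of_contains]
  · conv_rhs => rw [← List.map_id d.items]
    apply List.map_congr_left
    intro p hp
    by_cases hk : p.1 = k
    · have hpp : (p.1, p.2) ∈ d.items := by rwa [Prod.mk.eta]
      have : d.get? p.1 = some p.2 := PySem.Dict.get?_of_mem_items d hpp hnd
      rw [hk] at this
      rw [this] at h
      simp only [hk, beq_self_eq_true, if_pos, id]
      cases h
      rw [← hk, Prod.mk.eta]
    · simp [hk, id]
  · rw [PySem.Dict.contains_eq_isSome_get?, h]; rfl

def pvExtra (N : List (Int × List (Int × List (Int × Int)))) (i a : Int) : Int :=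
  match pvGetA N i with
  | some nrow => match pvGetA nrow a with
    | some cell => pv_sum_row cell
    | none => 0
  | none => 0

-- the A-port inner-loop body rewritten as a single insert at key i
theorem stepA_eq (N : List (Int × List (Int × List (Int × Int)))) (i : Int)
    (D : PySem.Dict Int (PySem.Dict Int Int)) (a : Int) :
    (let D' := if (D.get? i).isSome then D.modify i PySem.Dict.empty (fun row => row.insert a 1)
               else D.insert i (PySem.Dict.empty.insert a 1)
     match pvGetA N i with
     | some nrow =>
       match pvGetA nrow a with
       | some cell => D'.modify i PySem.Dict.empty (fun row => row.modify a 0 (fun v => v + pv_sum_row cell))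
       | none => D'
     | none => D')
    = D.insert i ((D.getD i PySem.Dict.empty).insert a (1 + pvExtra N i a)) := by
  have hD' : (if (D.get? i).isSome then D.modify i PySem.Dict.empty (fun row => row.insert a 1)
              else D.insert i (PySem.Dict.empty.insert a 1))
      = D.insert i ((D.getD i PySem.Dict.empty).insert a 1) := by
    by_cases h : (D.get? i).isSome
    · simp only [h, if_pos]; rfl
    · simp only [h, if_neg, Bool.false_eq_true, not_false_iff]
      have : D.getD i PySem.Dict.empty = PySem.Dict.empty := by
        cases hg : D.get? i with
        | none => exact PySem.Dict.getD_of_get?_eq_none D PySem.Dict.empty hg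
        | some r => rw [hg] at h; simp at h
      rw [this]
  simp only []
  rw [hD']
  unfold pvExtra
  cases hN : pvGetA N i with
  | none => simp
  | some nrow =>
    cases hr : pvGetA nrow a with
    | none => simp [hr]
    | some cell =>
      simp only [hr]
      have hmod : ∀ (d : PySem.Dict Int (PySem.Dict Int Int)) (k : Int) f,
          d.modify k PySem.Dict.empty f = d.insert k (f (d.getD k PySem.Dict.empty)) := fun _ _ _ => rfl
      rw [hmod]
      rw [PySem.Dict.getD_insert_self]
      have : ((D.getD i PySem.Dict.empty).insert a 1).modify a 0 (fun v => v + pv_sum_row cell)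
          = (D.getD i PySem.Dict.empty).insert a (1 + pv_sum_row cell) := by
        have hm2 : ∀ (d : PySem.Dict Int Int) (k : Int) f, d.modify k 0 f = d.insert k (f (d.getD k 0)) := fun _ _ _ => rfl
        rw [hm2, PySem.Dict.getD_insert_self, PySem.Dict.insert_insert_self]
      rw [this, PySem.Dict.insert_insert_self]

-- a fold whose every step re-inserts at the same key i collapses to one insert
theorem foldl_insert_key {β : Type} (step : PySem.Dict Int Int → β → PySem.Dict Int Int) (i : Int)
    (L : List β) (x : β) (D : PySem.Dict Int (PySem.Dict Int Int)) :
    (x :: L).foldl (fun D y => D.insert i (step (D.getD i PySem.Dict.empty) y)) D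
      = D.insert i ((x :: L).foldl step (D.getD i PySem.Dict.empty)) := by
  induction L generalizing x D with
  | nil => rfl
  | cons y L ih =>
    have h1 : (x :: y :: L).foldl (fun D y => D.insert i (step (D.getD i PySem.Dict.empty) y)) D
        = (y :: L).foldl (fun D y => D.insert i (step (D.getD i PySem.Dict.empty) y))
            (D.insert i (step (D.getD i PySem.Dict.empty) x)) := rfl
    rw [h1, ih, PySem.Dict.insert_insert_self, PySem.Dict.getD_insert_self]
    rfl

-- a loop inserting at fresh distinct keys appends its rows
theorem foldl_fresh (L : List Int) (F : Int → PySem.Dict Int Int → PySem.Dict Int Int)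
    (D : PySem.Dict Int (PySem.Dict Int Int)) (hnd : L.Nodup) (hfresh : ∀ i ∈ L, D.get? i = none) :
    (L.foldl (fun D i => D.insert i (F i (D.getD i PySem.Dict.empty))) D).items
      = D.items ++ L.map (fun i => (i, F i PySem.Dict.empty)) := by
  induction L generalizing D with
  | nil => simp
  | cons i0 L ih =>
    have h0 : D.get? i0 = none := hfresh i0 (by simp)
    have hg : D.getD i0 PySem.Dict.empty = PySem.Dict.empty :=
      PySem.Dict.getD_of_get?_eq_none D PySem.Dict.empty h0
    have hc : D.contains i0 = false := by
      rw [PySem.Dict.contains_eq_isSome_get?, h0]; rfl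
    have hstep : (i0 :: L).foldl (fun D i => D.insert i (F i (D.getD i PySem.Dict.empty))) D
        = L.foldl (fun D i => D.insert i (F i (D.getD i PySem.Dict.empty)))
            (D.insert i0 (F i0 PySem.Dict.empty)) := by
      simp [List.foldl_cons, hg]
    rw [hstep, ih]
    · rw [PySem.Dict.items_insert_of_not_contains _ _ hc]
      simp
    · exact hnd.of_cons
    · intro i hi
      rw [PySem.Dict.get?_insert_of_ne]
      · exact hfresh i (by simp [hi])
      · rintro rfl
        exact (List.nodup_cons.mp hnd).1 hi

def pvRowStepB (r : PySem.Dict Int Int) (q : Int × List (Int × Int)) : PySem.Dict Int Int :=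
  if (r.get? q.1).isSome then r.modify q.1 0 (fun v => v + (q.2.foldl (fun s kv => s + kv.2) 0)) else r

theorem getD_foldl_insert_fun (h : Int → Int) (A : List Int) (r : PySem.Dict Int Int) (b : Int) (d : Int) :
    (A.foldl (fun r a => r.insert a (h a)) r).getD b d = if b ∈ A then h b else r.getD b d := by
  induction A generalizing r with
  | nil => simp
  | cons a0 A ih =>
    rw [List.foldl_cons, ih]
    by_cases h1 : b ∈ A
    · simp [h1]
    · by_cases h2 : b = a0
      · simp [h2]
      · simp [h1, h2, PySem.Dict.getD_insert]

theorem keys_pvRowStepB_foldl (T : List (Int × List (Int × Int))) (r : PySem.Dict Int Int) :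
    (T.foldl pvRowStepB r).keys = r.keys := by
  induction T generalizing r with
  | nil => rfl
  | cons q T ih =>
    rw [List.foldl_cons, ih]
    unfold pvRowStepB
    by_cases hg : (r.get? q.1).isSome
    · simp only [hg, if_pos]
      rw [PySem.Dict.keys_modify, PySem.Dict.keys_insert_of_contains]
      rw [PySem.Dict.contains_eq_isSome_get?, hg]
    · simp [hg]

theorem pvGetA_nil {α : Type} (k : Int) : pvGetA ([] : List (Int × α)) k = none := rfl

theorem getD_pvRowStepB_foldl (T : List (Int × List (Int × Int))) (r : PySem.Dict Int Int) (b : Int)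
    (hT : (T.map (·.1)).Nodup) :
    (T.foldl pvRowStepB r).getD b 0
      = r.getD b 0 + (if (r.get? b).isSome then
          (match pvGetA T b with | some cell => cell.foldl (fun s kv => s + kv.2) 0 | none => 0) else 0) := by
  induction T generalizing r with
  | nil => simp [pvGetA_nil]
  | cons q T ih =>
    have hT' : (T.map (·.1)).Nodup := (List.nodup_cons.mp hT).2
    have hq : q.1 ∉ T.map (·.1) := (List.nodup_cons.mp hT).1
    rw [List.foldl_cons, ih _ hT', pvGetA_cons]
    by_cases hb : q.1 = b
    · subst hb
      have hTb : pvGetA T q.1 = none := pvGetA_eq_none T q.1 hq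
      by_cases hg : (r.get? q.1).isSome
      · have hmod : pvRowStepB r q = r.insert q.1 (r.getD q.1 0 + (q.2.foldl (fun s kv => s + kv.2) 0)) := by
          unfold pvRowStepB; rw [if_pos hg]; rfl
        rw [hmod, PySem.Dict.getD_insert_self, PySem.Dict.get?_insert_self]
        simp [hTb, hg]
      · have hmod : pvRowStepB r q = r := by unfold pvRowStepB; rw [if_neg hg]
        rw [hmod]
        simp [hg]
    · have hmatch : (if q.1 = b then some q.2 else pvGetA T b) = pvGetA T b := if_neg hb
      rw [hmatch]
      unfold pvRowStepB
      by_cases hg : (r.get? q.1).isSome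
      · have hmod : r.modify q.1 0 (fun v => v + (q.2.foldl (fun s kv => s + kv.2) 0))
            = r.insert q.1 (r.getD q.1 0 + (q.2.foldl (fun s kv => s + kv.2) 0)) := rfl
        rw [if_pos hg, hmod, PySem.Dict.getD_insert, PySem.Dict.get?_insert]
        have h1 : ¬ b = q.1 := fun h => hb h.symm
        simp [h1]
      · rw [if_neg hg]

-- B's inner loop over one row of N rewritten as one insert at key i
theorem foldB_inner (i : Int) (row : List (Int × List (Int × Int)))
    (D : PySem.Dict Int (PySem.Dict Int Int)) (r : PySem.Dict Int Int)
    (h : D.get? i = some r) (hnd : D.keys.Nodup) :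
    row.foldl (fun D q =>
        if ((D.getD i PySem.Dict.empty).get? q.1).isSome then
          D.modify i PySem.Dict.empty (fun r => r.modify q.1 0 (fun v => v + (q.2.foldl (fun s kv => s + kv.2) 0)))
        else D) D
      = D.insert i (row.foldl pvRowStepB r) := by
  induction row generalizing D r with
  | nil => exact (insert_get?_self D i r h hnd).symm
  | cons q row ih =>
    simp only [List.foldl_cons]
    have hgD : D.getD i PySem.Dict.empty = r := PySem.Dict.getD_of_get?_eq_some D PySem.Dict.empty h
    by_cases hg : (r.get? q.1).isSome
    · have hstep1 : (if ((D.getD i PySem.Dict.empty).get? q.1).isSome then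
            D.modify i PySem.Dict.empty (fun r => r.modify q.1 0 (fun v => v + (q.2.foldl (fun s kv => s + kv.2) 0)))
          else D) = D.insert i (pvRowStepB r q) := by
        rw [hgD, if_pos hg]
        have hrfl : D.modify i PySem.Dict.empty (fun r => r.modify q.1 0 (fun v => v + (q.2.foldl (fun s kv => s + kv.2) 0)))
            = D.insert i ((D.getD i PySem.Dict.empty).modify q.1 0 (fun v => v + (q.2.foldl (fun s kv => s + kv.2) 0))) := rfl
        rw [hrfl, hgD]
        unfold pvRowStepB
        rw [if_pos hg]
      rw [hstep1,
        ih (D.insert i (pvRowStepB r q)) (pvRowStepB r q) (PySem.Dict.get?_insert_self _ _ _)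
          (by
            have hc : D.contains i = true := by rw [PySem.Dict.contains_eq_isSome_get?, h]; rfl
            rw [PySem.Dict.keys_insert_of_contains D _ hc]; exact hnd),
        PySem.Dict.insert_insert_self]
    · have hstep1 : (if ((D.getD i PySem.Dict.empty).get? q.1).isSome then
            D.modify i PySem.Dict.empty (fun r => r.modify q.1 0 (fun v => v + (q.2.foldl (fun s kv => s + kv.2) 0)))
          else D) = D := by rw [hgD, if_neg hg]
      have hr1 : pvRowStepB r q = r := by unfold pvRowStepB; rw [if_neg hg]
      rw [hstep1, hr1, ih D r h hnd]

def pvRow0 (A : List Int) : PySem.Dict Int Int :=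
  A.foldl (fun r a => r.insert a (1 : Int)) PySem.Dict.empty

def pvRowA (N : List (Int × List (Int × List (Int × Int)))) (i : Int) (A : List Int) : PySem.Dict Int Int :=
  A.foldl (fun r a => r.insert a (1 + pvExtra N i a)) PySem.Dict.empty

-- B's pass over N rewritten: every item's row is updated by its (unique) N entry
theorem foldB_items (Nl : List (Int × List (Int × List (Int × Int))))
    (D : PySem.Dict Int (PySem.Dict Int Int)) (hnd : D.keys.Nodup) (hN : (Nl.map (·.1)).Nodup) :
    (Nl.foldl (fun D p =>
        if (D.get? p.1).isSome then
          p.2.foldl (fun D q =>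
            if ((D.getD p.1 PySem.Dict.empty).get? q.1).isSome then
              D.modify p.1 PySem.Dict.empty (fun r => r.modify q.1 0 (fun v => v + (q.2.foldl (fun s kv => s + kv.2) 0)))
            else D) D
        else D) D).items
      = D.items.map (fun e => (e.1,
          match pvGetA Nl e.1 with
          | some row => row.foldl pvRowStepB e.2
          | none => e.2)) := by
  induction Nl generalizing D with
  | nil => simp [pvGetA_nil]
  | cons p Nl ih =>
    have hN' : (Nl.map (·.1)).Nodup := (List.nodup_cons.mp hN).2
    have hp : p.1 ∉ Nl.map (·.1) := (List.nodup_cons.mp hN).1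
    simp only [List.foldl_cons]
    cases hD : D.get? p.1 with
    | none =>
      have hne : p.1 ∉ D.keys := (PySem.Dict.get?_eq_none_iff_not_mem_keys D p.1).mp hD
      rw [if_neg (by simp)]
      rw [ih D hnd hN']
      apply List.map_congr_left
      intro e he
      have hek : e.1 ∈ D.keys := PySem.Dict.mem_keys_of_mem_items D (show (e.1, e.2) ∈ D.items by rwa [Prod.mk.eta])
      rw [pvGetA_cons, if_neg (show ¬ p.1 = e.1 from fun h => hne (h ▸ hek))]
    | some r =>
      rw [if_pos (by rfl)]
      rw [foldB_inner p.1 p.2 D r hD hnd]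
      have hc : D.contains p.1 = true := by rw [PySem.Dict.contains_eq_isSome_get?, hD]; rfl
      have hkeys : (D.insert p.1 (p.2.foldl pvRowStepB r)).keys = D.keys :=
        PySem.Dict.keys_insert_of_contains D _ hc
      rw [ih _ (by rw [hkeys]; exact hnd) hN']
      rw [PySem.Dict.items_insert_of_contains D _ hc, List.map_map]
      apply List.map_congr_left
      intro e he
      simp only [Function.comp_def]
      by_cases hek : e.1 = p.1
      · have h2 : D.get? e.1 = some e.2 := PySem.Dict.get?_of_mem_items D (show (e.1, e.2) ∈ D.items by rwa [Prod.mk.eta]) hnd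
        have h3 : some e.2 = some r := by rw [← h2, hek, hD]
        have hev : e.2 = r := Option.some.inj h3
        have hga : pvGetA Nl p.1 = none := pvGetA_eq_none Nl p.1 hp
        simp [pvGetA_cons, hek, hev, hga]
      · have hbeq : (e.1 == p.1) = false := by simp [hek]
        simp only [hbeq, Bool.false_eq_true, if_false, pvGetA_cons]
        rw [if_neg (show ¬ p.1 = e.1 from fun h => hek h.symm)]

theorem keys_pvRow0 (A : List Int) : (pvRow0 A).keys = PySem.Set.ofList A := by
  unfold pvRow0
  rw [PySem.Dict.keys_foldl_insert A (fun _ a => (1 : Int)) PySem.Dict.empty]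
  rw [PySem.Dict.keys_empty, PySem.Set.update_nil_left]

theorem keys_pvRowA (N : List (Int × List (Int × List (Int × Int)))) (i : Int) (A : List Int) :
    (pvRowA N i A).keys = PySem.Set.ofList A := by
  unfold pvRowA
  rw [PySem.Dict.keys_foldl_insert A (fun _ a => 1 + pvExtra N i a) PySem.Dict.empty]
  rw [PySem.Dict.keys_empty, PySem.Set.update_nil_left]

theorem nodup_keys_pvRowA (N : List (Int × List (Int × List (Int × Int)))) (i : Int) (A : List Int) :
    (pvRowA N i A).keys.Nodup := by
  rw [keys_pvRowA]; exact PySem.Set.nodup_ofList A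

theorem getD_pvRow0 (A : List Int) (b : Int) :
    (pvRow0 A).getD b 0 = if b ∈ A then 1 else 0 := by
  unfold pvRow0
  rw [getD_foldl_insert_fun (fun _ => 1) A PySem.Dict.empty b 0]
  simp [PySem.Dict.getD_empty]

theorem getD_pvRowA (N : List (Int × List (Int × List (Int × Int)))) (i : Int) (A : List Int) (b : Int) :
    (pvRowA N i A).getD b 0 = if b ∈ A then 1 + pvExtra N i b else 0 := by
  unfold pvRowA
  rw [getD_foldl_insert_fun (fun a => 1 + pvExtra N i a) A PySem.Dict.empty b 0]
  simp [PySem.Dict.getD_empty]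

theorem row_eq (N : List (Int × List (Int × List (Int × Int)))) (A : List Int) (i : Int)
    (hnr : ∀ p ∈ N, (p.2.map (·.1)).Nodup) :
    (match pvGetA N i with
     | some row => row.foldl pvRowStepB (pvRow0 A)
     | none => pvRow0 A) = pvRowA N i A := by
  cases hN : pvGetA N i with
  | none =>
    have hx : ∀ a, pvExtra N i a = 0 := by intro a; unfold pvExtra; rw [hN]
    unfold pvRowA pvRow0
    have : (fun (r : PySem.Dict Int Int) a => r.insert a (1 + pvExtra N i a))
        = fun (r : PySem.Dict Int Int) a => r.insert a 1 := by
      funext r a; rw [hx a]; norm_num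
    rw [this]
  | some nrow =>
    have hmem : (i, nrow) ∈ N := pvGetA_mem hN
    have hnrow : (nrow.map (·.1)).Nodup := hnr (i, nrow) hmem
    apply PySem.Dict.ext
    have hkL : (nrow.foldl pvRowStepB (pvRow0 A)).keys = PySem.Set.ofList A := by
      rw [keys_pvRowStepB_foldl, keys_pvRow0]
    have hndL : (nrow.foldl pvRowStepB (pvRow0 A)).keys.Nodup := by
      rw [hkL]; exact PySem.Set.nodup_ofList A
    rw [PySem.Dict.items_eq_map_keys _ hndL 0, PySem.Dict.items_eq_map_keys _ (nodup_keys_pvRowA N i A) 0]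
    rw [hkL, keys_pvRowA]
    apply List.map_congr_left
    intro b hb
    have hbA : b ∈ A := (PySem.Set.mem_ofList A b).mp hb
    have hbk : b ∈ (pvRow0 A).keys := by rw [keys_pvRow0]; exact hb
    have hsome : ((pvRow0 A).get? b).isSome := by
      cases hg : (pvRow0 A).get? b with
      | none => exact absurd ((PySem.Dict.get?_eq_none_iff_not_mem_keys _ b).mp hg) (by simp [hbk])
      | some _ => rfl
    rw [getD_pvRowStepB_foldl nrow (pvRow0 A) b hnrow, getD_pvRow0, getD_pvRowA]
    have hx : pvExtra N i b = (match pvGetA nrow b with | some cell => pv_sum_row cell | none => 0) := by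
      unfold pvExtra; rw [hN]
    rw [if_pos hsome, if_pos hbA, if_pos hbA, hx]
    cases pvGetA nrow b <;> simp [pv_sum_row]

-- A's loop produces exactly the rows pvRowA, in range order
theorem foldA_items (total_num_state : Int) (N : List (Int × List (Int × List (Int × Int))))
    (A : List Int) (hA : A ≠ []) :
    ((PySem.List.pyRange 1 (total_num_state + 1) 1).foldl (fun D i =>
      A.foldl (fun D a =>
        let D := if (D.get? i).isSome then D.modify i PySem.Dict.empty (fun row => row.insert a 1)
                 else D.insert i (PySem.Dict.empty.insert a 1)
        match pvGetA N i with
        | some nrow =>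
          match pvGetA nrow a with
          | some cell => D.modify i PySem.Dict.empty (fun row => row.modify a 0 (fun v => v + pv_sum_row cell))
          | none => D
        | none => D) D) PySem.Dict.empty).items
      = (PySem.List.pyRange 1 (total_num_state + 1) 1).map (fun i => (i, pvRowA N i A)) := by
  obtain ⟨x, L, rfl⟩ : ∃ x L, A = x :: L := by
    cases A with
    | nil => exact absurd rfl hA
    | cons x L => exact ⟨x, L, rfl⟩
  have hinner : ∀ (i : Int) (D : PySem.Dict Int (PySem.Dict Int Int)),
      (x :: L).foldl (fun D a =>
        let D := if (D.get? i).isSome then D.modify i PySem.Dict.empty (fun row => row.insert a 1)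
                 else D.insert i (PySem.Dict.empty.insert a 1)
        match pvGetA N i with
        | some nrow =>
          match pvGetA nrow a with
          | some cell => D.modify i PySem.Dict.empty (fun row => row.modify a 0 (fun v => v + pv_sum_row cell))
          | none => D
        | none => D) D
      = D.insert i ((x :: L).foldl (fun r a => r.insert a (1 + pvExtra N i a)) (D.getD i PySem.Dict.empty)) := by
    intro i D
    have hfun : (fun (D : PySem.Dict Int (PySem.Dict Int Int)) a =>
        let D := if (D.get? i).isSome then D.modify i PySem.Dict.empty (fun row => row.insert a 1)
                 else D.insert i (PySem.Dict.empty.insert a 1)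
        match pvGetA N i with
        | some nrow =>
          match pvGetA nrow a with
          | some cell => D.modify i PySem.Dict.empty (fun row => row.modify a 0 (fun v => v + pv_sum_row cell))
          | none => D
        | none => D)
        = fun D a => D.insert i ((D.getD i PySem.Dict.empty).insert a (1 + pvExtra N i a)) := by
      funext D a
      exact stepA_eq N i D a
    rw [hfun]
    exact foldl_insert_key (fun r a => r.insert a (1 + pvExtra N i a)) i L x D
  have houter : ((PySem.List.pyRange 1 (total_num_state + 1) 1).foldl (fun D i =>
      (x :: L).foldl (fun D a =>
        let D := if (D.get? i).isSome then D.modify i PySem.Dict.empty (fun row => row.insert a 1)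
                 else D.insert i (PySem.Dict.empty.insert a 1)
        match pvGetA N i with
        | some nrow =>
          match pvGetA nrow a with
          | some cell => D.modify i PySem.Dict.empty (fun row => row.modify a 0 (fun v => v + pv_sum_row cell))
          | none => D
        | none => D) D) PySem.Dict.empty)
      = ((PySem.List.pyRange 1 (total_num_state + 1) 1).foldl (fun D i =>
          D.insert i ((x :: L).foldl (fun r a => r.insert a (1 + pvExtra N i a))
            (D.getD i PySem.Dict.empty))) PySem.Dict.empty) := by
    congr 1
    funext D i
    exact hinner i D
  rw [houter]
  exact (foldl_fresh (PySem.List.pyRange 1 (total_num_state + 1) 1)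
      (fun i r => (x :: L).foldl (fun r a => r.insert a (1 + pvExtra N i a)) r) PySem.Dict.empty
      (PySem.List.nodup_pyRange_one 1 (total_num_state + 1))
      (fun i _ => PySem.Dict.get?_empty i)).trans (by simp [pvRowA]; rfl)

-- B's grid build produces one pvRow0 row per range element
theorem foldB0_items (total_num_state : Int) (A : List Int) :
    ((PySem.List.pyRange 1 (total_num_state + 1) 1).foldl (fun D i =>
        D.insert i (A.foldl (fun r a => r.insert a (1 : Int)) PySem.Dict.empty)) PySem.Dict.empty).items
      = (PySem.List.pyRange 1 (total_num_state + 1) 1).map (fun i => (i, pvRow0 A)) := by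
  exact (foldl_fresh (PySem.List.pyRange 1 (total_num_state + 1) 1)
      (fun _ _ => pvRow0 A) PySem.Dict.empty
      (PySem.List.nodup_pyRange_one 1 (total_num_state + 1))
      (fun i _ => PySem.Dict.get?_empty i)).trans (by simp; rfl)

theorem main_equiv : ∀ (total_num_state : Int) (N : List (Int × List (Int × List (Int × Int)))) (A : List Int),
    (N.map (·.1)).Nodup → (∀ p ∈ N, (p.2.map (·.1)).Nodup) →
    create_dirichlet_dict total_num_state N A = create_dirichlet_dict_alt total_num_state N A := by
  intro t N A hN hnr
  by_cases hA : A = []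
  · subst hA
    simp [create_dirichlet_dict, create_dirichlet_dict_alt]
    rfl
  · simp only [create_dirichlet_dict, create_dirichlet_dict_alt]
    have hAne : A.isEmpty = false := by
      cases A with
      | nil => exact absurd rfl hA
      | cons x L => rfl
    rw [hAne, if_neg (by simp)]
    -- rewrite both .items
    rw [foldA_items t N A hA]
    have hD0keys : (((PySem.List.pyRange 1 (t + 1) 1).foldl (fun D i =>
        D.insert i (A.foldl (fun r a => r.insert a (1 : Int)) PySem.Dict.empty)) PySem.Dict.empty)).keys
        = PySem.List.pyRange 1 (t + 1) 1 := by
      show (((PySem.List.pyRange 1 (t + 1) 1).foldl (fun D i =>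
        D.insert i (A.foldl (fun r a => r.insert a (1 : Int)) PySem.Dict.empty)) PySem.Dict.empty)).items.map (·.1)
        = PySem.List.pyRange 1 (t + 1) 1
      rw [foldB0_items t A, List.map_map]
      rw [show ((fun (x : ℤ × PySem.Dict ℤ ℤ) => x.1) ∘ fun i => (i, pvRow0 A)) = id from rfl,
        List.map_id]
    rw [foldB_items N _ (by rw [hD0keys]; exact PySem.List.nodup_pyRange_one 1 (t + 1)) hN]
    rw [foldB0_items t A, List.map_map, List.map_map, List.map_map]
    apply List.map_congr_left
    intro i _
    simp only [Function.comp_def]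
    have := row_eq N A i hnr
    rw [← this]

-- ===== VERDICT (by name: the statement is the Claim_ definition above) =====
theorem create_dirichlet_dict_spec : Claim_equal_create_dirichlet_dict := by
  intro total_num_state N A _ hpre
  unfold Spec_create_dirichlet_dict
  exact main_equiv total_num_state N A hpre.1 hpre.2
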